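-- pv_equiv track=rewrite | github.com/MarkCalcott/Analyse_epistatic_interactions | Create_mutation_network/create_network.py | create_network_dictionary
-- ===== SOURCE A (Python) =====
-- def create_network_dictionary(keys):
--     '''
--     Creates a dictionary of the number of mutations from wt as the key,
--     and all the sequences with that number of differences as values
--     '''
--     dictNetwork = {}
--     for i in range(len(keys[0])+1):
--         dictNetwork[i] = []
--
--     for j in keys:
--         distance = j.count('1')
--         newData = dictNetwork[distance]
--         newData.append(j)
--         dictNetwork[distance] = newData
--
--     return dictNetwork.copy()
-- ===== SOURCE B (Python) =====
-- def create_network_dictionary(keys):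
--     '''
--     Creates a dictionary of the number of mutations from wt as the key,
--     and all the sequences with that number of differences as values
--     '''
--     size = len(keys[0]) + 1
--     return {i: [j for j in keys if j.count('1') == i] for i in range(size)}
-- ===== Notes on version B (the rewrite author's own statement) =====
-- stated objective: idiomatic
-- what changed: A routes each key once into pre-initialised buckets by repeated dict get/append/reassign; B inverts the nesting into one dict comprehension that, for each distance i in range(len(keys[0])+1), scans the key list and filters the keys with count('1') == i.
-- outside the precondition, e.g. on create_network_dictionary(['0', '11']): A raises KeyError, B returns {0: ['0'], 1: []}
import Mathlib
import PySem

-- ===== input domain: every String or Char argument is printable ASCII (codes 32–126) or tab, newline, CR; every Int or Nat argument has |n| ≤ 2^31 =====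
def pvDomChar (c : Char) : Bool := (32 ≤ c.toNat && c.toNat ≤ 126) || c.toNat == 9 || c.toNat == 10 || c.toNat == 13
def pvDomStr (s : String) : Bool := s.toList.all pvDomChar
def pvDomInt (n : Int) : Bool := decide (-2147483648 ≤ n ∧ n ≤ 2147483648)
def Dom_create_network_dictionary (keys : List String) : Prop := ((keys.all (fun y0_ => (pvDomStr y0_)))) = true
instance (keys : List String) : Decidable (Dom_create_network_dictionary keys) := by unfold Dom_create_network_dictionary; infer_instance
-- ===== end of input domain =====

-- B replaces A's bucket-routing loop (pre-initialised dict, get/append/reassign per key) by a single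
-- dict comprehension that filters the key list once per distance; idiomatic, not faster.


-- ===== PORT A =====
def create_network_dictionary (keys : List String) : List (Int × List String) :=
  -- dictNetwork = {}; for i in range(len(keys[0])+1): dictNetwork[i] = []
  -- keys[0] raises IndexError on empty keys: excluded by Pre_ (pyGetD default never used inside Pre_)
  let d0 : PySem.Dict Int (List String) :=
    (PySem.List.pyRange 0 (PySem.Str.len (PySem.List.pyGetD keys 0 "") + 1)).foldl
      (fun d i => d.insert i []) PySem.Dict.empty
  -- for j in keys: distance = j.count('1'); newData = dictNetwork[distance]; newData.append(j); dictNetwork[distance] = newData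
  -- dictNetwork[distance] raises KeyError when distance is not a key: excluded by Pre_ (getD default never used inside Pre_)
  let d : PySem.Dict Int (List String) :=
    keys.foldl (fun d j =>
      let distance : Int := PySem.Str.count j "1"
      let newData := d.getD distance []
      d.insert distance (newData ++ [j])) d0
  d.items    -- return dictNetwork.copy()

-- ===== PORT B =====
def create_network_dictionary_alt (keys : List String) : List (Int × List String) :=
  let size : Int := PySem.Str.len (PySem.List.pyGetD keys 0 "") + 1
  -- {i: [j for j in keys if j.count('1') == i] for i in range(size)} — distinct keys, in range order
  (PySem.List.pyRange 0 size).map (fun i =>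
    (i, keys.filter (fun j => (PySem.Str.count j "1" : Int) == i)))

-- ===== PRECONDITION & SPEC =====
-- Pre_ excludes exactly the inputs where A raises: empty keys (IndexError on keys[0]) and key lists
-- containing a key with more '1's than len(keys[0]) (KeyError on dictNetwork[distance]).
def Pre_create_network_dictionary (keys : List String) : Prop :=
  keys ≠ [] ∧ ∀ j ∈ keys, (PySem.Str.count j "1" : Int) ≤ PySem.Str.len (PySem.List.pyGetD keys 0 "")
instance (keys : List String) : Decidable (Pre_create_network_dictionary keys) := by
  unfold Pre_create_network_dictionary; infer_instance
def pvWitness_create_network_dictionary : List String := ["010", "000", "111", "011"]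
def Spec_create_network_dictionary (keys : List String) (out : List (Int × List String)) : Prop := out = create_network_dictionary_alt keys
instance (keys : List String) (out : List (Int × List String)) : Decidable (Spec_create_network_dictionary keys out) := by unfold Spec_create_network_dictionary; infer_instance

-- ===== CLAIM (what is proved, stated in full; the proofs are below) =====
def Claim_equal_create_network_dictionary : Prop := ∀ (keys : List String), Dom_create_network_dictionary keys → Pre_create_network_dictionary keys → Spec_create_network_dictionary keys (create_network_dictionary keys)

-- ===== LEMMAS AND PROOFS =====

-- PySem.Set.update adds nothing when every updated element is already present
theorem pvSetUpdateSelf (S : PySem.Set Int) (l : List Int) (h : ∀ x ∈ l, x ∈ S) :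
    PySem.Set.update S l = S := by
  induction l generalizing S with
  | nil => exact PySem.Set.update_nil S
  | cons x xs ih =>
      rw [PySem.Set.update_cons]
      have hx : S.add x = S := by
        simp [PySem.Set.add, PySem.Set.contains, h x (by simp)]
      rw [hx]
      exact ih S (fun y hy => h y (by simp [hy]))


theorem pvMainEq (keys : List String)
    (hb : ∀ j ∈ keys, (PySem.Str.count j "1" : Int) ≤ PySem.Str.len (PySem.List.pyGetD keys 0 "")) :
    create_network_dictionary keys = create_network_dictionary_alt keys := by
  unfold create_network_dictionary create_network_dictionary_alt
  set L : Int := PySem.Str.len (PySem.List.pyGetD keys 0 "") with hLdef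
  have hL : 0 ≤ L := by rw [hLdef, PySem.Str.len_eq]; positivity
  set R : List Int := PySem.List.pyRange 0 (L + 1) with hRdef
  have hRcast : R = List.map (Nat.cast : Nat → Int) (List.range (L.toNat + 1)) := by
    rw [hRdef, show L + 1 = ((L.toNat + 1 : Nat) : Int) by omega, PySem.List.pyRange_zero_natCast]
  have hRnodup : R.Nodup := by
    rw [hRcast]
    exact (List.nodup_range).map (fun a b h => by exact_mod_cast h)
  set dist : String → Int := fun j => (PySem.Str.count j "1" : Int) with hdist
  set d0 : PySem.Dict Int (List String) :=
      R.foldl (fun d i => d.insert i []) PySem.Dict.empty with hd0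
  have hd0items : d0.items = R.map (fun i => (i, ([] : List String))) := by
    rw [hd0]
    have := PySem.Dict.items_foldl_insert_fresh (l := R) (k := fun i => i)
      (v := fun _ => ([] : List String)) (d := PySem.Dict.empty)
      (by intro a _; simp [PySem.Dict.contains_empty]) (by simpa using hRnodup)
    simpa using this
  have hd0keys : d0.keys = R := by
    simp [PySem.Dict.keys, hd0items, List.map_map, Function.comp_def]
  have hd0getD : ∀ c : Int, d0.getD c [] = [] := by
    intro c
    by_cases hc : c ∈ d0.keys
    · have hmem : (c, ([] : List String)) ∈ d0.items := by
        rw [hd0keys] at hc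
        rw [hd0items]; exact List.mem_map_of_mem hc
      exact PySem.Dict.getD_of_mem_items d0 hmem (hd0keys ▸ hRnodup) []
    · exact PySem.Dict.getD_of_not_contains d0 [] (by
        rw [← Bool.not_eq_true, PySem.Dict.contains_iff_mem_keys]; exact hc)
  -- the A-loop, rephrased as modify
  have hfold : keys.foldl (fun d j =>
        let distance : Int := PySem.Str.count j "1"
        let newData := d.getD distance []
        d.insert distance (newData ++ [j])) d0
      = keys.foldl (fun d j => d.modify (dist j) [] (fun v => v ++ [j])) d0 := rfl
  set d : PySem.Dict Int (List String) :=
      keys.foldl (fun d j => d.modify (dist j) [] (fun v => v ++ [j])) d0 with hd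
  have hdistR : ∀ j ∈ keys, dist j ∈ R := by
    intro j hj
    rw [hRdef]
    exact PySem.List.mem_pyRange_one.mpr ⟨by simp [hdist], by have := hb j hj; simp only [hdist]; omega⟩
  have hdkeys : d.keys = R := by
    rw [hd, PySem.Dict.keys_foldl_modify_key keys dist [] (fun _ j v => v ++ [j]) d0, hd0keys]
    exact pvSetUpdateSelf R (keys.map dist) (by intro x hx; obtain ⟨j, hj, rfl⟩ := List.mem_map.mp hx; exact hdistR j hj)
  have hgetD : ∀ c : Int, d.getD c [] = keys.filter (fun j => dist j == c) := by
    intro c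
    have hmap : d = (keys.map (fun j => (dist j, j))).foldl
        (fun d p => d.modify p.1 [] (fun v => v ++ [p.2])) d0 := by
      rw [hd, List.foldl_map]
    rw [hmap, PySem.Dict.getD_foldl_modify_append, hd0getD]
    simp [List.filter_map, List.map_map, Function.comp_def]
  have hitems : d.items = R.map (fun c => (c, keys.filter (fun j => dist j == c))) := by
    rw [PySem.Dict.items_eq_map_keys d (hdkeys ▸ hRnodup) [], hdkeys]
    exact List.map_congr_left (fun c _ => by rw [hgetD])
  simp only [hfold]
  exact hitems

theorem create_network_dictionary_spec : Claim_equal_create_network_dictionary := by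
  intro keys _ hpre
  exact pvMainEq keys hpre.2
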